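-- pv_equiv track=rewrite | github.com/duytanqb/supover-desktop-app | reference/etsy-spy/scripts/get_apparel_mug.py | is_apparel_or_mug
-- ===== SOURCE A (Python) =====
-- APPAREL_TAGS = {"shirt", "tee", "t-shirt", "hoodie", "sweatshirt", "sweater", "pullover", "crewneck"}
--
-- MUG_TAGS = {"mug", "cup", "travel mug", "coffee mug"}
--
-- def is_apparel_or_mug(tags_str):
--     if not tags_str:
--         return False
--     tags = set(t.lower() for t in tags_str.split(','))
--     # Check for apparel tags
--     for tag in tags:
--         if any(apparel in tag for apparel in APPAREL_TAGS):
--             return True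
--         if any(mug in tag for mug in MUG_TAGS):
--             return True
--     return False
-- ===== SOURCE B (Python) =====
-- APPAREL_TAGS = {"shirt", "tee", "t-shirt", "hoodie", "sweatshirt", "sweater", "pullover", "crewneck"}
--
-- MUG_TAGS = {"mug", "cup", "travel mug", "coffee mug"}
--
-- ALL_PATTERNS = APPAREL_TAGS | MUG_TAGS
--
-- def is_apparel_or_mug(tags_str):
--     if not tags_str:
--         return False
--     low = tags_str.lower()
--     return any(p in low for p in ALL_PATTERNS)
-- ===== Notes on version B (the rewrite author's own statement) =====
-- stated objective: simpler
-- what changed: B merges APPAREL_TAGS and MUG_TAGS into one pattern set and tests each pattern against the whole lowercased string once, eliminating the comma split, the per-tag set construction and the nested per-tag loop (valid because no pattern contains a comma).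
import Mathlib
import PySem

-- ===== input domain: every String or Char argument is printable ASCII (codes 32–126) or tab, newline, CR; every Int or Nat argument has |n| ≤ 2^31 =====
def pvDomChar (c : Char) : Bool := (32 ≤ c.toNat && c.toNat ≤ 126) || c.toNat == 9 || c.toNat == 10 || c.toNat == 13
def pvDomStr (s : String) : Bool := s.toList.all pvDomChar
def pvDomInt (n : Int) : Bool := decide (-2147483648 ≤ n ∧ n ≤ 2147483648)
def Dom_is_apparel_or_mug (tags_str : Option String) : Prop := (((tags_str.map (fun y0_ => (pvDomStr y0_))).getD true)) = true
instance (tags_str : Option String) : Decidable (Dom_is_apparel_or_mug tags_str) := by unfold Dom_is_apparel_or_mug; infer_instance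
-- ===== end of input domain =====

-- B merges the two pattern sets and tests each pattern against the whole lowercased
-- string once (no pattern contains a comma, so per-tag containment and whole-string
-- containment agree); objective: simpler — no split, no per-tag set, no nested loop.

-- ===== PORT A =====
def APPAREL_TAGS : PySem.Set String :=
  PySem.Set.ofList ["shirt", "tee", "t-shirt", "hoodie", "sweatshirt", "sweater", "pullover", "crewneck"]

def MUG_TAGS : PySem.Set String :=
  PySem.Set.ofList ["mug", "cup", "travel mug", "coffee mug"]

-- 'for tag in tags: return True on first hit, else False' is an order-independent
-- existential over the set, so folding it as List.any over the PySem.Set is exact.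
def is_apparel_or_mug (tags_str : Option String) : Bool :=
  match tags_str with
  | none => false
  | some s =>
    if s = "" then false
    else
      -- tags = set(t.lower() for t in tags_str.split(','))  (sep "," is non-empty, so split? is some)
      let tags : PySem.Set String :=
        PySem.Set.ofList (((PySem.Str.split? s ",").getD []).map PySem.Str.lower)
      tags.any (fun tag =>
        if APPAREL_TAGS.any (fun apparel => PySem.Str.isIn apparel tag) then true
        else if MUG_TAGS.any (fun mug => PySem.Str.isIn mug tag) then true
        else false)

-- ===== PORT B =====
def ALL_PATTERNS : PySem.Set String :=
  PySem.Set.union APPAREL_TAGS MUG_TAGS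

def is_apparel_or_mug_alt (tags_str : Option String) : Bool :=
  match tags_str with
  | none => false
  | some s =>
    if s = "" then false
    else
      let low := PySem.Str.lower s
      ALL_PATTERNS.any (fun p => PySem.Str.isIn p low)

-- ===== PRECONDITION & SPEC =====
def Spec_is_apparel_or_mug (tags_str : Option String) (out : Bool) : Prop := out = is_apparel_or_mug_alt tags_str
instance (tags_str : Option String) (out : Bool) : Decidable (Spec_is_apparel_or_mug tags_str out) := by unfold Spec_is_apparel_or_mug; infer_instance

-- ===== CLAIM (what is proved, stated in full; the proofs are below) =====
def Claim_equal_is_apparel_or_mug : Prop := ∀ (tags_str : Option String), Dom_is_apparel_or_mug tags_str → Spec_is_apparel_or_mug tags_str (is_apparel_or_mug tags_str)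

-- ===== LEMMAS AND PROOFS =====

-- simple reference splitter on a single separator char ','
def mySplit : List Char → List (List Char)
  | [] => [[]]
  | a :: t =>
    if a = ',' then [] :: mySplit t
    else match mySplit t with
      | [] => [[a]]
      | h :: r => (a :: h) :: r

def consHead (u : List Char) : List (List Char) → List (List Char)
  | [] => [u]
  | h :: r => (u ++ h) :: r

-- joinC L = ','.join(L)
def joinC : List (List Char) → List Char
  | [] => []
  | [h] => h
  | h :: t => h ++ ',' :: joinC t

lemma mySplit_ne_nil (l : List Char) : mySplit l ≠ [] := by
  cases l with
  | nil => simp [mySplit]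
  | cons a t =>
    simp only [mySplit]
    split
    · simp
    · split <;> simp_all

lemma splitOn_go_eq (fuel : Nat) : ∀ (l cur : List Char) (acc : List (List Char)),
    l.length < fuel →
    PySem.Chars.splitOn.go [','] fuel l cur acc = acc.reverse ++ consHead cur.reverse (mySplit l) := by
  induction fuel with
  | zero => intro l cur acc h; omega
  | succ fuel ih =>
    intro l cur acc h
    cases l with
    | nil => simp [PySem.Chars.splitOn.go, mySplit, consHead]
    | cons c rest =>
      by_cases hc : c = ','
      · subst hc
        rw [show PySem.Chars.splitOn.go [','] (fuel+1) (',' :: rest) cur acc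
              = PySem.Chars.splitOn.go [','] fuel rest [] (cur.reverse :: acc) from by
          simp [PySem.Chars.splitOn.go, List.isPrefixOf]]
        rw [ih rest [] (cur.reverse :: acc) (by simpa using h)]
        cases hm : mySplit rest with
        | nil => exact absurd hm (mySplit_ne_nil rest)
        | cons h0 r => simp [mySplit, hm, consHead]
      · rw [show PySem.Chars.splitOn.go [','] (fuel+1) (c :: rest) cur acc
              = PySem.Chars.splitOn.go [','] fuel rest (c :: cur) acc from by
          simp [PySem.Chars.splitOn.go, List.isPrefixOf, Ne.symm hc]]
        rw [ih rest (c :: cur) acc (by simpa using h)]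
        cases hm : mySplit rest with
        | nil => exact absurd hm (mySplit_ne_nil rest)
        | cons h0 r => simp [mySplit, hm, consHead, hc]

lemma splitOn_eq_mySplit (l : List Char) :
    PySem.Chars.splitOn l [','] = mySplit l := by
  have := splitOn_go_eq (l.length + 1) l [] [] (by omega)
  cases hm : mySplit l with
  | nil => exact absurd hm (mySplit_ne_nil l)
  | cons h r =>
    simpa [PySem.Chars.splitOn, hm, consHead] using this

lemma joinC_mySplit (l : List Char) : joinC (mySplit l) = l := by
  induction l with
  | nil => simp [mySplit, joinC]
  | cons a t ih =>
    by_cases ha : a = ','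
    · subst ha
      cases hm : mySplit t with
      | nil => exact absurd hm (mySplit_ne_nil t)
      | cons h r => simp_all [mySplit, joinC]
    · cases hm : mySplit t with
      | nil => exact absurd hm (mySplit_ne_nil t)
      | cons h r =>
        cases r with
        | nil => simp_all [mySplit, joinC]
        | cons r0 r' => simp_all [mySplit, joinC]

lemma lower_joinC (L : List (List Char)) :
    PySem.Chars.lower (joinC L) = joinC (L.map PySem.Chars.lower) := by
  induction L with
  | nil => simp [joinC, PySem.Chars.lower]
  | cons h t ih =>
    cases t with
    | nil => simp [joinC]
    | cons t0 t' =>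
      simp only [joinC, List.map_cons] at *
      simp [PySem.Chars.lower, List.map_append] at *
      constructor
      · rfl
      · exact ih

lemma prefix_no_c {p u v : List Char} {c : Char} (hc : c ∉ p) (h : p <+: u ++ c :: v) :
    p <+: u := by
  induction p generalizing u with
  | nil => simp
  | cons a p' ih =>
    cases u with
    | nil =>
      have hac : a = c := (List.cons_prefix_cons.mp h).1
      simp [hac] at hc
    | cons b u' =>
      rcases List.cons_prefix_cons.mp h with ⟨hab, h'⟩
      exact List.cons_prefix_cons.mpr ⟨hab, ih (fun hm => hc (List.mem_cons_of_mem _ hm)) h'⟩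

lemma infix_drop_iff (p x : List Char) : p <:+: x ↔ ∃ j, p <+: x.drop j := by
  rw [← PySem.Chars.isIn_iff_infix, ← PySem.Chars.exists_prefix_drop_iff_isIn]

lemma infix_split {p q r : List Char} {c : Char} (hc : c ∉ p) :
    p <:+: (q ++ c :: r) ↔ (p <:+: q ∨ p <:+: r) := by
  constructor
  · intro h
    rcases (infix_drop_iff p _).mp h with ⟨j, hj⟩
    by_cases hjq : j ≤ q.length
    · rw [List.drop_append_of_le_length hjq] at hj
      exact Or.inl ((infix_drop_iff p q).mpr ⟨j, prefix_no_c hc hj⟩)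
    · rw [List.drop_append, List.drop_eq_nil_of_le (by omega), List.nil_append,
          show j - q.length = (j - q.length - 1) + 1 from by omega, List.drop_succ_cons] at hj
      exact Or.inr ((infix_drop_iff p r).mpr ⟨j - q.length - 1, hj⟩)
  · rintro (h | h)
    · exact h.trans ⟨[], c :: r, by simp⟩
    · exact h.trans ⟨q ++ [c], [], by simp⟩

lemma infix_joinC {p : List Char} (hc : ',' ∉ p) :
    ∀ L : List (List Char), L ≠ [] → (p <:+: joinC L ↔ ∃ q ∈ L, p <:+: q) := by
  intro L
  induction L with
  | nil => simp
  | cons h t ih =>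
    intro _
    cases t with
    | nil => simp [joinC]
    | cons t0 t' =>
      rw [show joinC (h :: t0 :: t') = h ++ ',' :: joinC (t0 :: t') from rfl,
          infix_split hc, ih (by simp)]
      simp

-- the key fact: a comma-free pattern is in the lowered whole string iff it is in some lowered piece
lemma keyP {p : List Char} (hc : ',' ∉ p) (s : List Char) :
    p <:+: PySem.Chars.lower s ↔ ∃ t ∈ PySem.Chars.splitOn s [','], p <:+: PySem.Chars.lower t := by
  conv_lhs => rw [← joinC_mySplit s]
  rw [lower_joinC, infix_joinC hc _ (by simp [mySplit_ne_nil])]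
  simp [splitOn_eq_mySplit]

lemma any_pattern_split (P : List String) (hP : ∀ p ∈ P, (',' : Char) ∉ p.toList) (s : String) :
    (P.any fun p => PySem.Str.isIn p (PySem.Str.lower s)) =
      ((((PySem.Str.split? s ",").getD []).map PySem.Str.lower).any fun t => P.any fun p => PySem.Str.isIn p t) := by
  have hsplit : ((PySem.Str.split? s ",").getD []).map String.toList = PySem.Chars.splitOn s.toList [','] := by
    have h := PySem.Str.split?_map s ","
    have h2 : PySem.Chars.split? s.toList [','] = some (PySem.Chars.splitOn s.toList [',']) := by
      simp [PySem.Chars.split?]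
    rw [show ("," : String).toList = [','] from rfl, h2] at h
    cases hs : PySem.Str.split? s "," with
    | none => rw [hs] at h; simp at h
    | some L => rw [hs] at h; simpa using h
  rw [Bool.eq_iff_iff]
  simp only [List.any_eq_true, List.mem_map]
  constructor
  · rintro ⟨p, hp, hin⟩
    rw [PySem.Str.isIn_iff_infix, PySem.Str.toList_lower, keyP (hP p hp) s.toList, ← hsplit] at hin
    rcases hin with ⟨tc, htc, hinf⟩
    rcases List.mem_map.mp htc with ⟨t, ht, rfl⟩
    exact ⟨PySem.Str.lower t, ⟨t, ht, rfl⟩, p, hp, by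
      rw [PySem.Str.isIn_iff_infix, PySem.Str.toList_lower]; exact hinf⟩
  · rintro ⟨lt, ⟨t, ht, rfl⟩, p, hp, hin⟩
    refine ⟨p, hp, ?_⟩
    rw [PySem.Str.isIn_iff_infix, PySem.Str.toList_lower, keyP (hP p hp) s.toList, ← hsplit]
    exact ⟨t.toList, List.mem_map.mpr ⟨t, ht, rfl⟩, by
      rw [PySem.Str.isIn_iff_infix, PySem.Str.toList_lower] at hin; exact hin⟩

lemma any_ofList {α : Type} [BEq α] [LawfulBEq α] (xs : List α) (f : α → Bool) :
    (PySem.Set.ofList xs).any f = xs.any f := by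
  rw [Bool.eq_iff_iff]
  simp only [List.any_eq_true]
  constructor
  · rintro ⟨x, hx, hf⟩; exact ⟨x, (PySem.Set.mem_ofList xs x).mp hx, hf⟩
  · rintro ⟨x, hx, hf⟩; exact ⟨x, (PySem.Set.mem_ofList xs x).mpr hx, hf⟩

-- ===== VERDICT (by name: the statement is the Claim_ definition above) =====
theorem is_apparel_or_mug_spec : Claim_equal_is_apparel_or_mug := by
  intro tags_str _
  unfold Spec_is_apparel_or_mug
  cases tags_str with
  | none => rfl
  | some s =>
    simp only [is_apparel_or_mug, is_apparel_or_mug_alt]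
    by_cases hs : s = ""
    · simp [hs]
    · simp only [hs, if_false]
      have hAll : ALL_PATTERNS = APPAREL_TAGS ++ MUG_TAGS := by decide
      rw [hAll, any_ofList]
      rw [show ∀ L : List String, (L.any fun tag =>
            if APPAREL_TAGS.any (fun a => PySem.Str.isIn a tag) then true
            else if MUG_TAGS.any (fun m => PySem.Str.isIn m tag) then true else false) =
          (L.any fun tag => (APPAREL_TAGS ++ MUG_TAGS).any fun p => PySem.Str.isIn p tag) from by
        intro L; congr 1; funext tag
        cases hA : APPAREL_TAGS.any (fun a => PySem.Str.isIn a tag) <;>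
          cases hB : MUG_TAGS.any (fun m => PySem.Str.isIn m tag) <;>
            simp only [List.any_append, hA, hB, if_true, Bool.false_or,
              Bool.or_self, Bool.or_false] <;> rfl]
      rw [show (APPAREL_TAGS ++ MUG_TAGS : List String) =
          ["shirt", "tee", "t-shirt", "hoodie", "sweatshirt", "sweater", "pullover", "crewneck",
           "mug", "cup", "travel mug", "coffee mug"] from by decide] at *
      rw [any_pattern_split _ (by decide) s]
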